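-- pv_equiv track=rewrite | github.com/NastyaVlasenkova/Codewars_Vlasenkova | Parts of a list.py | partlist
-- ===== SOURCE A (Python) =====
-- def partlist(arr):
--     result=[]
--     for item, elem in enumerate(arr):
--         if item==len(arr)-1:
--             break
--         else:
--             result.append((" ".join(arr[:item+1])," ".join(arr[item+1:])))
--     return result
-- ===== SOURCE B (Python) =====
-- def partlist(arr):
--     if len(arr) < 2:
--         return []
--     mid = arr[1:-1]
--     # prefix joins, built left-to-right: pres[i] = " ".join(arr[:i+1])
--     p = arr[0]
--     pres = [p]
--     for x in mid:
--         p = p + " " + x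
--         pres.append(p)
--     # suffix joins, built right-to-left: sufs[i] = " ".join(arr[i+1:])
--     s = arr[-1]
--     sufs = [s]
--     for x in reversed(mid):
--         s = x + " " + s
--         sufs.append(s)
--     sufs.reverse()
--     return list(zip(pres, sufs))
-- ===== Notes on version B (the rewrite author's own statement) =====
-- stated objective: alternative
-- what changed: Replaces A's per-index re-slicing and full re-join of the array at every iteration with two incremental scans (a running prefix string built left-to-right and a running suffix string built right-to-left) that are then zipped, so each output string is built by one concatenation instead of a full slice+join.
import Mathlib
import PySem

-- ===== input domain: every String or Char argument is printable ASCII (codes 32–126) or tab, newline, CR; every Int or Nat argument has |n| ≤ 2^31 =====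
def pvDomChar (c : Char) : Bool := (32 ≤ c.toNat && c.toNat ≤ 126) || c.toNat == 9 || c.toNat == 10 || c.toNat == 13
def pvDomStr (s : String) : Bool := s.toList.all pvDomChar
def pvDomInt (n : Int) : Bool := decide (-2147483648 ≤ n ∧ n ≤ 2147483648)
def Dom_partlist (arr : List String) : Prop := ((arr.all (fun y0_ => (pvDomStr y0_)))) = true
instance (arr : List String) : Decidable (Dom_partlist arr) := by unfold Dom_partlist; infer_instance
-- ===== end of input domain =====

-- B replaces A's per-index re-slicing and re-joining with two incremental scans
-- (running prefix string left-to-right, running suffix string right-to-left) zipped together;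
-- objective: alternative decomposition (one concatenation per step instead of a full slice+join).

-- ===== PORT A =====
-- the 'for item, elem in enumerate(arr)' loop with its break, step for step
def partlistA_loop (arr : List String) (items : List (Int × String)) (acc : List (String × String)) : List (String × String) :=
  match items with
  | [] => acc
  | (item, _elem) :: rest =>
    if item = (arr.length : Int) - 1 then acc
    else partlistA_loop arr rest
      (acc ++ [(PySem.Str.join " " (PySem.List.slice arr none (some (item + 1))),
                PySem.Str.join " " (PySem.List.slice arr (some (item + 1)) none))])

def partlist (arr : List String) : List (String × String) :=
  partlistA_loop arr (PySem.List.enumerate arr 0) []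

-- ===== PORT B =====
-- 'p + " " + x' is ported as code-point concatenation (exact for Python str +)
def partlist_alt (arr : List String) : List (String × String) :=
  if arr.length < 2 then []
  else
    let mid := PySem.List.slice arr (some 1) (some (-1))
    let p0 := PySem.List.pyGetD arr 0 ""
    let pres := (mid.foldl (fun (st : String × List String) x =>
        let p := String.ofList (st.1.toList ++ ' ' :: x.toList)
        (p, st.2 ++ [p])) (p0, [p0])).2
    let s0 := PySem.List.pyGetD arr (-1) ""
    let sufs := (mid.reverse.foldl (fun (st : String × List String) x =>
        let s := String.ofList (x.toList ++ ' ' :: st.1.toList)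
        (s, st.2 ++ [s])) (s0, [s0])).2
    List.zip pres sufs.reverse

-- ===== PRECONDITION & SPEC =====
def Spec_partlist (arr : List String) (out : List (String × String)) : Prop := out = partlist_alt arr
instance (arr : List String) (out : List (String × String)) : Decidable (Spec_partlist arr out) := by unfold Spec_partlist; infer_instance

-- ===== CLAIM (what is proved, stated in full; the proofs are below) =====
def Claim_equal_partlist : Prop := ∀ (arr : List String), Dom_partlist arr → Spec_partlist arr (partlist arr)

-- ===== LEMMAS AND PROOFS =====

-- the common reference value: pair i = (join of arr[:i+1], join of arr[i+1:]), i = 0..n-2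
def refList (arr : List String) : List (String × String) :=
  (List.range (arr.length - 1)).map (fun i =>
    (PySem.Str.join " " (arr.take (i+1)), PySem.Str.join " " (arr.drop (i+1))))

theorem charsJoin_append (sp : List Char) (ys : List (List Char)) (x : List Char) (h : ys ≠ []) :
    PySem.Chars.join sp (ys ++ [x]) = PySem.Chars.join sp ys ++ sp ++ x := by
  induction ys with
  | nil => simp at h
  | cons b ys ih =>
    cases ys with
    | nil => simp [PySem.Chars.join_cons_cons, PySem.Chars.join_singleton]
    | cons c ys' =>
      have := ih (by simp)
      simp only [List.cons_append, PySem.Chars.join_cons_cons] at *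
      simp [this]

theorem J_append (ys : List String) (x : String) (h : ys ≠ []) :
    PySem.Str.join " " (ys ++ [x]) =
      String.ofList ((PySem.Str.join " " ys).toList ++ ' ' :: x.toList) := by
  apply String.toList_inj.mp
  simp [PySem.Str.toList_join, charsJoin_append [' '] (ys.map String.toList) x.toList (by simpa using h)]

theorem J_cons (x : String) (suf : List String) (h : suf ≠ []) :
    PySem.Str.join " " (x :: suf) =
      String.ofList (x.toList ++ ' ' :: (PySem.Str.join " " suf).toList) := by
  apply String.toList_inj.mp
  obtain ⟨b, rest, rfl⟩ := List.exists_cons_of_ne_nil h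
  simp [PySem.Str.toList_join, PySem.Chars.join_cons_cons]

-- proof-only scan helper: jscan f p xs = [p, f p x1, f (f p x1) x2, …]
def jscan (f : String → String → String) (p : String) : List String → List String
  | [] => [p]
  | x :: xs => p :: jscan f (f p x) xs

theorem jscan_cons_tail (f : String → String → String) (p : String) (xs : List String) :
    jscan f p xs = p :: (jscan f p xs).tail := by
  cases xs <;> rfl

-- the foldl state (running string, output list) is a scan
theorem foldl_scan (f : String → String → String) :
    ∀ (xs : List String) (p : String) (acc : List String),
      (xs.foldl (fun (st : String × List String) x =>
          (f st.1 x, st.2 ++ [f st.1 x])) (p, acc)).2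
        = acc ++ (jscan f p xs).tail := by
  intro xs
  induction xs with
  | nil => intro p acc; simp [jscan]
  | cons x xs ih =>
    intro p acc
    simp only [List.foldl_cons, jscan, List.tail_cons]
    rw [ih]
    conv_rhs => rw [jscan_cons_tail]
    simp

-- A's loop, characterised
theorem partlistA_loop_eq (arr : List String) :
    ∀ (k : Nat) (acc : List (String × String)), k ≤ arr.length →
      partlistA_loop arr (PySem.List.enumerate (arr.drop k) (k : Int)) acc
        = acc ++ (List.range (arr.length - 1 - k)).map (fun j =>
            (PySem.Str.join " " (arr.take (k + j + 1)), PySem.Str.join " " (arr.drop (k + j + 1)))) := by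
  intro k
  induction hn : arr.length - k generalizing k with
  | zero =>
    intro acc hk
    have hke : k = arr.length := by omega
    subst hke
    simp [List.drop_length, PySem.List.enumerate_nil, partlistA_loop,
      Nat.sub_eq_zero_of_le (by omega : arr.length - 1 ≤ arr.length)]
  | succ n ih =>
    intro acc hk
    have hklt : k < arr.length := by omega
    have hdrop : arr.drop k = arr[k] :: arr.drop (k+1) := (List.getElem_cons_drop _).symm
    rw [hdrop, PySem.List.enumerate_cons]
    simp only [partlistA_loop]
    split_ifs with hEq
    · have hk1 : k = arr.length - 1 := by omega
      simp [Nat.sub_eq_zero_of_le (by omega : arr.length - 1 ≤ k)]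
    · have hcast : (k : Int) + 1 = ((k + 1 : Nat) : Int) := by push_cast; ring
      rw [hcast, ih (k+1) (by omega) _ (by omega)]
      rw [PySem.List.slice_to_natCast, PySem.List.slice_from_natCast]
      have hr : arr.length - 1 - k = (arr.length - 1 - (k+1)) + 1 := by omega
      rw [hr, List.range_succ_eq_map]
      simp only [List.map_cons, List.map_map, Function.comp_def, List.append_assoc,
        List.cons_append, List.nil_append, Nat.add_zero]
      refine congrArg (acc ++ ·) (congrArg (List.cons _) ?_)
      apply List.map_congr_left
      intro j _
      simp only [Nat.succ_eq_add_one]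
      rw [show k + (j + 1) + 1 = k + 1 + j + 1 by omega]

theorem partlist_eq_ref (arr : List String) : partlist arr = refList arr := by
  have h := partlistA_loop_eq arr 0 [] (by omega)
  simpa [partlist, refList] using h

theorem scan_pref (pre : List String) (xs : List String) (h : pre ≠ []) :
    jscan (fun p x => String.ofList (p.toList ++ ' ' :: x.toList)) (PySem.Str.join " " pre) xs
      = (List.range (xs.length + 1)).map (fun i => PySem.Str.join " " (pre ++ xs.take i)) := by
  induction xs generalizing pre with
  | nil => simp [jscan]
  | cons x xs ih =>
    simp only [jscan]
    rw [show String.ofList ((PySem.Str.join " " pre).toList ++ ' ' :: x.toList)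
          = PySem.Str.join " " (pre ++ [x]) from (J_append pre x h).symm]
    rw [ih (pre ++ [x]) (by simp)]
    rw [List.length_cons]
    conv_rhs => rw [List.range_succ_eq_map]
    simp [List.map_map, Function.comp_def, List.append_assoc, List.take_succ_cons]

theorem scan_suf (suf : List String) (xs : List String) (h : suf ≠ []) :
    jscan (fun s x => String.ofList (x.toList ++ ' ' :: s.toList)) (PySem.Str.join " " suf) xs
      = (List.range (xs.length + 1)).map (fun i => PySem.Str.join " " ((xs.take i).reverse ++ suf)) := by
  induction xs generalizing suf with
  | nil => simp [jscan]
  | cons x xs ih =>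
    simp only [jscan]
    rw [show String.ofList (x.toList ++ ' ' :: (PySem.Str.join " " suf).toList)
          = PySem.Str.join " " (x :: suf) from (J_cons x suf h).symm]
    rw [ih (x :: suf) (by simp)]
    rw [List.length_cons]
    conv_rhs => rw [List.range_succ_eq_map]
    simp [List.map_map, Function.comp_def, List.append_assoc, List.take_succ_cons,
      List.reverse_cons]

theorem J_single (a : String) : PySem.Str.join " " [a] = a := by
  apply String.toList_inj.mp
  simp [PySem.Str.toList_join, PySem.Chars.join_singleton]

theorem revmap_range {α : Type} (n : Nat) (h : Nat → α) :
    ((List.range n).map h).reverse = (List.range n).map (fun i => h (n - 1 - i)) := by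
  apply List.ext_getElem (by simp)
  intro i h1 h2
  simp [List.getElem_reverse]

theorem drop_append_singleton {α : Type} (mid : List α) (z : α) :
    ∀ (i : Nat), i ≤ mid.length → (mid ++ [z]).drop i = mid.drop i ++ [z] := by
  induction mid with
  | nil =>
    intro i hi
    have : i = 0 := by simpa using hi
    subst this
    simp
  | cons x xs ih =>
    intro i hi
    cases i with
    | zero => simp
    | succ i => simpa using ih i (by simpa using hi)

theorem slice_mid (a z : String) (mid : List String) :
    PySem.List.slice (a :: (mid ++ [z])) (some 1) (some (-1)) = mid := by
  simp [PySem.List.slice]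

theorem partlist_alt_eq_ref (arr : List String) : partlist_alt arr = refList arr := by
  by_cases hlen : arr.length < 2
  · have h0 : arr.length - 1 = 0 := by omega
    simp [partlist_alt, refList, hlen, h0]
  · obtain ⟨a, rest, rfl⟩ : ∃ a rest, arr = a :: rest := by
      cases arr with
      | nil => simp at hlen
      | cons a rest => exact ⟨a, rest, rfl⟩
    have hrest : rest ≠ [] := by
      intro h; subst h; simp at hlen
    obtain ⟨mid, z, rfl⟩ : ∃ mid z, rest = mid ++ [z] :=
      ⟨rest.dropLast, rest.getLast hrest, (List.dropLast_append_getLast hrest).symm⟩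
    simp only [partlist_alt, if_neg hlen]
    rw [slice_mid]
    rw [show PySem.List.pyGetD (a :: (mid ++ [z])) 0 "" = a from PySem.List.pyGetD_zero_cons ..]
    rw [show a :: (mid ++ [z]) = (a :: mid) ++ [z] from by simp,
        PySem.List.pyGetD_neg_one_append_singleton]
    rw [foldl_scan (fun p x => String.ofList (p.toList ++ ' ' :: x.toList)),
        foldl_scan (fun s x => String.ofList (x.toList ++ ' ' :: s.toList))]
    rw [show [a] ++ (jscan (fun p x => String.ofList (p.toList ++ ' ' :: x.toList)) a mid).tail
          = jscan (fun p x => String.ofList (p.toList ++ ' ' :: x.toList)) a mid from by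
        conv_rhs => rw [jscan_cons_tail]
        simp]
    rw [show [z] ++ (jscan (fun s x => String.ofList (x.toList ++ ' ' :: s.toList)) z mid.reverse).tail
          = jscan (fun s x => String.ofList (x.toList ++ ' ' :: s.toList)) z mid.reverse from by
        conv_rhs => rw [jscan_cons_tail]
        simp]
    rw [show jscan (fun p x => String.ofList (p.toList ++ ' ' :: x.toList)) a mid
          = jscan (fun p x => String.ofList (p.toList ++ ' ' :: x.toList)) (PySem.Str.join " " [a]) mid from by
        rw [J_single]]
    rw [show jscan (fun s x => String.ofList (x.toList ++ ' ' :: s.toList)) z mid.reverse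
          = jscan (fun s x => String.ofList (x.toList ++ ' ' :: s.toList)) (PySem.Str.join " " [z]) mid.reverse from by
        rw [J_single]]
    rw [scan_pref [a] mid (by simp), scan_suf [z] mid.reverse (by simp)]
    rw [List.length_reverse, revmap_range, List.zip_map']
    unfold refList
    rw [show (a :: mid) ++ [z] = a :: (mid ++ [z]) from by simp]
    rw [show (a :: (mid ++ [z])).length - 1 = mid.length + 1 from by simp]
    apply List.map_congr_left
    intro i hi
    have him : i ≤ mid.length := by
      have := List.mem_range.mp hi; omega
    have e1 : (a :: (mid ++ [z])).take (i+1) = [a] ++ mid.take i := by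
      simp [List.take_append_of_le_length him]
    have e2 : (a :: (mid ++ [z])).drop (i+1) = (mid.reverse.take (mid.length + 1 - 1 - i)).reverse ++ [z] := by
      have h1 : (mid.reverse.take (mid.length + 1 - 1 - i)).reverse = mid.drop i := by
        rw [show mid.length + 1 - 1 - i = mid.length - i by omega]
        simp [List.take_reverse, Nat.sub_sub_self him]
      rw [List.drop_succ_cons, drop_append_singleton mid z i him, h1]
    rw [e1, e2]


-- ===== VERDICT (by name: the statement is the Claim_ definition above) =====
theorem partlist_spec : Claim_equal_partlist := by
  intro arr _
  unfold Spec_partlist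
  rw [partlist_eq_ref, partlist_alt_eq_ref]
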